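-- pv_equiv track=rewrite | github.com/tlijkkkk/mark_v | leetcode-practice/leetcode_practice/two_pointers/sliding_windows/leetcode1838_max_frequent_element_k_ops.py | max_freq_element_k_operations
-- ===== SOURCE A (Python) =====
-- from typing import List
--
-- def max_freq_element_k_operations(nums: List[int], k: int) -> int:
--     sorted_nums = sorted(nums)
--     i = 0
--     tmp_sum = 0
--     longest = 0
--
--     for j in range(len(sorted_nums)):
--         tmp_sum += sorted_nums[j]
--
--         while sorted_nums[j] * (j - i + 1) - tmp_sum > k:
--             tmp_sum -= sorted_nums[i]
--             i += 1
--
--         longest = max(longest, j - i + 1)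
--
--     return longest
-- ===== SOURCE B (Python) =====
-- from typing import List
--
-- def max_freq_element_k_operations(nums: List[int], k: int) -> int:
--     s = sorted(nums)
--     n = len(s)
--     prefix = [0]
--     for v in s:
--         prefix.append(prefix[-1] + v)
--
--     def feasible(length: int) -> bool:
--         if length == 0:
--             return True
--         for j in range(length - 1, n):
--             if s[j] * length - (prefix[j + 1] - prefix[j + 1 - length]) <= k:
--                 return True
--         return False
--
--     lo, hi = 0, n
--     while lo < hi:
--         mid = (lo + hi + 1) // 2
--         if feasible(mid):
--             lo = mid
--         else:
--             hi = mid - 1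
--     return lo
-- ===== Notes on version B (the rewrite author's own statement) =====
-- stated objective: alternative
-- what changed: Replaces the two-pointer sliding window carrying a running sum with sort + prefix-sum table + binary search on the answer length, testing each candidate length by a scan of fixed-length windows.
import Mathlib
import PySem

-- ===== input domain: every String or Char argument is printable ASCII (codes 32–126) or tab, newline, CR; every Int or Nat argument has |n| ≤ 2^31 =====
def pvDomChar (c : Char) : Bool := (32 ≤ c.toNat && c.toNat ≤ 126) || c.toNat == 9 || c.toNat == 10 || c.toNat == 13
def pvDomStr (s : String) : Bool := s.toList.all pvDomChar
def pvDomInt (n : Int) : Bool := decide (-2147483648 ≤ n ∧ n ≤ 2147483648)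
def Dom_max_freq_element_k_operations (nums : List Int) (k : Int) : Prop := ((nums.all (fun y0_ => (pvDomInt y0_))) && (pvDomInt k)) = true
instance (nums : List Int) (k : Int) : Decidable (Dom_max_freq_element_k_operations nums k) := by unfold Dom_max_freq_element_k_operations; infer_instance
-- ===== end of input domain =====

-- B replaces the two-pointer sliding window with prefix sums + binary search on the
-- answer length (objective: alternative algorithm, same asymptotic cost).

-- ===== PORT A =====
-- the inner 'while' of A: returns (i, tmp_sum); none = IndexError or fuel exhausted
-- (never happens on Pre_)
def pvAwhile (s : List Int) (k : Int) (j : ℕ) : ℕ → ℕ → Int → Option (ℕ × Int)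
  | 0, _, _ => none
  | fuel+1, i, tmp =>
    if s.getD j 0 * ((j : Int) - (i : Int) + 1) - tmp > k then
      match PySem.List.pyGet? s (i : Int) with
      | none => none
      | some v => pvAwhile s k j fuel (i+1) (tmp - v)
    else some (i, tmp)

-- the 'for j in range(len(sorted_nums))' loop with state (i, tmp_sum, longest)
def pvAloop (s : List Int) (k : Int) : List ℕ → ℕ → Int → Int → Option Int
  | [], _, _, longest => some longest
  | j :: js, i, tmp, longest =>
    let tmp' := tmp + s.getD j 0
    match pvAwhile s k j (s.length + 1) i tmp' with
    | none => none
    | some (i', tmp'') => pvAloop s k js i' tmp'' (max longest ((j : Int) - (i' : Int) + 1))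

def max_freq_element_k_operations (nums : List Int) (k : Int) : Int :=
  let s := PySem.List.sorted nums (fun x => x) false
  (pvAloop s k (List.range s.length) 0 0 0).getD 0

-- ===== PORT B =====
-- prefix[0]=0; prefix.append(prefix[-1]+v) for v in s  (a left scan)
def pvPrefix (s : List Int) : List Int := List.scanl (· + ·) 0 s

-- feasible(length): some window of 'length' consecutive sorted values fits in k ops
def pvFeasible (s P : List Int) (k : Int) (L : ℕ) : Bool :=
  if L = 0 then true
  else (List.range' (L-1) (s.length - (L-1))).any
    (fun j => decide (s.getD j 0 * (L : Int) - (P.getD (j+1) 0 - P.getD (j+1-L) 0) ≤ k))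

-- binary search on the answer: lo, hi; while lo < hi: mid=(lo+hi+1)//2 …
def pvBS (s P : List Int) (k : Int) : ℕ → ℕ → ℕ → ℕ
  | 0, lo, _ => lo
  | fuel+1, lo, hi =>
    if lo < hi then
      let mid := (lo + hi + 1) / 2
      if pvFeasible s P k mid then pvBS s P k fuel mid hi
      else pvBS s P k fuel lo (mid - 1)
    else lo

def max_freq_element_k_operations_alt (nums : List Int) (k : Int) : Int :=
  let s := PySem.List.sorted nums (fun x => x) false
  let P := pvPrefix s
  ((pvBS s P k (s.length + 1) 0 s.length : ℕ) : Int)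

-- ===== PRECONDITION & SPEC =====
-- Pre_ excludes exactly the inputs on which A raises IndexError: a nonempty list with
-- k < 0 makes A's shrink loop walk i past the end of the list.
def Pre_max_freq_element_k_operations (nums : List Int) (k : Int) : Prop :=
  nums = [] ∨ 0 ≤ k
instance (nums : List Int) (k : Int) : Decidable (Pre_max_freq_element_k_operations nums k) := by unfold Pre_max_freq_element_k_operations; infer_instance

def pvWitness_max_freq_element_k_operations : List Int × Int := ([1, 4, 2], 3)


def Spec_max_freq_element_k_operations (nums : List Int) (k : Int) (out : Int) : Prop := out = max_freq_element_k_operations_alt nums k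
instance (nums : List Int) (k : Int) (out : Int) : Decidable (Spec_max_freq_element_k_operations nums k out) := by unfold Spec_max_freq_element_k_operations; infer_instance

-- ===== CLAIM (what is proved, stated in full; the proofs are below) =====
def Claim_equal_max_freq_element_k_operations : Prop := ∀ (nums : List Int) (k : Int), Dom_max_freq_element_k_operations nums k → Pre_max_freq_element_k_operations nums k → Spec_max_freq_element_k_operations nums k (max_freq_element_k_operations nums k)


-- ===== LEMMAS AND PROOFS =====

-- sum of the segment s[a:b]
def pvSeg (s : List Int) (a b : ℕ) : Int := ((s.take b).sum) - ((s.take a).sum)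

-- cost of raising window s[i..j] to s[j]
def pvCost (s : List Int) (i j : ℕ) : Int := s.getD j 0 * ((j : Int) + 1 - (i : Int)) - pvSeg s i (j+1)

-- least window start at right end j (= j itself always qualifies as a fallback)
def pvMinI (s : List Int) (k : Int) (j : ℕ) : ℕ :=
  Nat.find (p := fun i => pvCost s i j ≤ k ∨ i = j) ⟨j, Or.inr rfl⟩

-- running best over the first m right-ends
def pvBest (s : List Int) (k : Int) : ℕ → ℕ
  | 0 => 0
  | m+1 => max (pvBest s k m) (m + 1 - pvMinI s k m)

theorem pv_take_succ_sum (s : List Int) (j : ℕ) (hj : j < s.length) :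
    ((s.take (j+1)).sum) = ((s.take j).sum) + s.getD j 0 := by
  rw [List.take_add_one, List.sum_append]
  simp [List.getElem?_eq_getElem hj]

theorem pv_getD_mono (s : List Int) (hs : s.Pairwise (· ≤ ·)) (i j : ℕ)
    (hij : i ≤ j) (hj : j < s.length) : s.getD i 0 ≤ s.getD j 0 := by
  rcases Nat.lt_or_ge i j with h | h
  · rw [List.getD_eq_getElem _ _ (lt_of_le_of_lt hij hj), List.getD_eq_getElem _ _ hj]
    exact List.pairwise_iff_getElem.mp hs i j (lt_of_le_of_lt hij hj) hj h
  · have : i = j := le_antisymm hij h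
    subst this; rfl

theorem pvCost_self (s : List Int) (j : ℕ) (hj : j < s.length) : pvCost s j j = 0 := by
  unfold pvCost pvSeg
  rw [pv_take_succ_sum s j hj]
  ring

theorem pvCost_succ_left (s : List Int) (i j : ℕ) (hij : i < s.length) :
    pvCost s i j = pvCost s (i+1) j + (s.getD j 0 - s.getD i 0) := by
  unfold pvCost pvSeg
  rw [pv_take_succ_sum s i hij]
  push_cast
  ring

theorem pvCost_anti (s : List Int) (hs : s.Pairwise (· ≤ ·)) (i i' j : ℕ)
    (h1 : i ≤ i') (h2 : i' ≤ j) (hj : j < s.length) : pvCost s i' j ≤ pvCost s i j := by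
  induction i' with
  | zero =>
    have : i = 0 := Nat.le_zero.mp h1
    subst this; exact le_refl _
  | succ m ih =>
    rcases Nat.lt_or_ge i (m+1) with hlt | hge
    · have him : i ≤ m := by omega
      have hmj : m < s.length := by omega
      have hstep := pvCost_succ_left s m j hmj
      have hmono := pv_getD_mono s hs m j (by omega) hj
      have := ih him (by omega)
      linarith
    · have : i = m + 1 := by omega
      subst this; exact le_refl _

theorem pvMinI_le (s : List Int) (k : Int) (j : ℕ) : pvMinI s k j ≤ j := by
  exact Nat.find_le (Or.inr rfl)

theorem pvMinI_cost (s : List Int) (k : Int) (j : ℕ) (hk : 0 ≤ k) (hj : j < s.length) :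
    pvCost s (pvMinI s k j) j ≤ k := by
  rcases Nat.find_spec (p := fun i => pvCost s i j ≤ k ∨ i = j) ⟨j, Or.inr rfl⟩ with h | h
  · exact h
  · unfold pvMinI
    rw [h, pvCost_self s j hj]
    exact hk

theorem pvMinI_min (s : List Int) (k : Int) (j i : ℕ) (hi : i < pvMinI s k j) :
    ¬ pvCost s i j ≤ k := by
  intro hc
  exact Nat.find_min (p := fun i => pvCost s i j ≤ k ∨ i = j) ⟨j, Or.inr rfl⟩ hi (Or.inl hc)

theorem pvMinI_le_of_cost (s : List Int) (k : Int) (j i : ℕ) (h : pvCost s i j ≤ k) :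
    pvMinI s k j ≤ i := by
  by_contra hlt
  exact pvMinI_min s k j i (by omega) h

theorem pvCost_succ_right (s : List Int) (i j : ℕ) (hij : i ≤ j + 1) (hj : j + 1 < s.length) :
    pvCost s i (j+1) = pvCost s i j + (s.getD (j+1) 0 - s.getD j 0) * ((j : Int) + 1 - (i : Int)) := by
  unfold pvCost pvSeg
  rw [show j + 1 + 1 = (j+1) + 1 from rfl, pv_take_succ_sum s (j+1) hj]
  push_cast
  ring

theorem pvMinI_mono_succ (s : List Int) (k : Int) (hs : s.Pairwise (· ≤ ·)) (j : ℕ)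
    (hj : j + 1 < s.length) : pvMinI s k j ≤ pvMinI s k (j+1) := by
  set m := pvMinI s k (j+1) with hm
  rcases Nat.lt_or_ge j m with hgt | hle
  · have := pvMinI_le s k j
    omega
  · -- m ≤ j : the optimal start for j+1 is also feasible for j
    have hspec : pvCost s m (j+1) ≤ k ∨ m = j+1 :=
      Nat.find_spec (p := fun i => pvCost s i (j+1) ≤ k ∨ i = j+1) ⟨j+1, Or.inr rfl⟩
    have hcost1 : pvCost s m (j+1) ≤ k := by
      rcases hspec with h | h
      · exact h
      · omega
    have hsr := pvCost_succ_right s m j (by omega) hj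
    have hmono := pv_getD_mono s hs j (j+1) (by omega) hj
    have hnn : (0:Int) ≤ (s.getD (j+1) 0 - s.getD j 0) * ((j : Int) + 1 - (m : Int)) := by
      apply mul_nonneg
      · linarith
      · have : m ≤ j + 1 := by omega
        push_cast
        omega
    have hcost0 : pvCost s m j ≤ k := by linarith
    exact pvMinI_le_of_cost s k j m hcost0

theorem pvAwhile_spec (s : List Int) (k : Int) (hs : s.Pairwise (· ≤ ·)) (hk : 0 ≤ k)
    (j : ℕ) (hj : j < s.length) :
    ∀ fuel i₀, i₀ ≤ pvMinI s k j → pvMinI s k j - i₀ < fuel →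
      pvAwhile s k j fuel i₀ (pvSeg s i₀ (j+1)) =
        some (pvMinI s k j, pvSeg s (pvMinI s k j) (j+1)) := by
  intro fuel
  induction fuel with
  | zero => intro i₀ h1 h2; omega
  | succ f ih =>
    intro i₀ h1 h2
    have hcond : s.getD j 0 * ((j : Int) - (i₀ : Int) + 1) - pvSeg s i₀ (j+1) = pvCost s i₀ j := by
      unfold pvCost; ring
    rcases Nat.lt_or_ge i₀ (pvMinI s k j) with hlt | hge
    · have hgt : ¬ pvCost s i₀ j ≤ k := pvMinI_min s k j i₀ hlt
      have hi₀len : i₀ < s.length := by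
        have := pvMinI_le s k j; omega
      have hget : PySem.List.pyGet? s (i₀ : Int) = some (s.getD i₀ 0) := by
        rw [PySem.List.pyGet?_natCast, List.getElem?_eq_getElem hi₀len,
          List.getD_eq_getElem _ _ hi₀len]
      simp only [pvAwhile]
      rw [hcond, if_pos (by omega : pvCost s i₀ j > k), hget]
      have hseg : pvSeg s i₀ (j+1) - s.getD i₀ 0 = pvSeg s (i₀+1) (j+1) := by
        unfold pvSeg
        rw [pv_take_succ_sum s i₀ hi₀len]
        ring
      dsimp only
      rw [hseg]
      exact ih (i₀+1) (by omega) (by omega)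
    · have heq : i₀ = pvMinI s k j := by omega
      have hle2 : pvCost s i₀ j ≤ k := heq ▸ pvMinI_cost s k j hk hj
      simp only [pvAwhile]
      rw [hcond, if_neg (by omega : ¬ pvCost s i₀ j > k), heq]

theorem pvBest_cast (s : List Int) (k : Int) (j : ℕ) (hj : pvMinI s k j ≤ j) :
    max ((pvBest s k j : ℕ) : Int) ((j : Int) - (pvMinI s k j : Int) + 1)
      = ((pvBest s k (j+1) : ℕ) : Int) := by
  have h2 : ((j + 1 - pvMinI s k j : ℕ) : Int) = (j : Int) - (pvMinI s k j : Int) + 1 := by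
    omega
  simp only [pvBest, Nat.cast_max, h2]

theorem pvAloop_spec (s : List Int) (k : Int) (hs : s.Pairwise (· ≤ ·)) (hk : 0 ≤ k) :
    ∀ d j i₀, j + d = s.length → (j < s.length → i₀ ≤ pvMinI s k j) →
      pvAloop s k (List.range' j d) i₀ (pvSeg s i₀ j) ((pvBest s k j : ℕ) : Int)
        = some ((pvBest s k s.length : ℕ) : Int) := by
  intro d
  induction d with
  | zero =>
    intro j i₀ hlen _
    have : j = s.length := by omega
    subst this
    simp [pvAloop, List.range']
  | succ d ih =>
    intro j i₀ hlen hle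
    have hj : j < s.length := by omega
    have hile : i₀ ≤ pvMinI s k j := hle hj
    rw [List.range'_succ]
    simp only [pvAloop]
    have htmp : pvSeg s i₀ j + s.getD j 0 = pvSeg s i₀ (j+1) := by
      unfold pvSeg
      rw [pv_take_succ_sum s j hj]
      ring
    rw [htmp, pvAwhile_spec s k hs hk j hj (s.length + 1) i₀ hile (by have := pvMinI_le s k j; omega)]
    dsimp only
    rw [pvBest_cast s k j (pvMinI_le s k j)]
    exact ih (j+1) (pvMinI s k j) (by omega) (fun h => pvMinI_mono_succ s k hs j h)

theorem pvA_eq_best (s : List Int) (k : Int) (hs : s.Pairwise (· ≤ ·)) (hk : 0 ≤ k) :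
    (pvAloop s k (List.range s.length) 0 0 0).getD 0 = ((pvBest s k s.length : ℕ) : Int) := by
  have h := pvAloop_spec s k hs hk s.length 0 0 (by omega) (fun _ => Nat.zero_le _)
  have h0 : pvSeg s 0 0 = 0 := by unfold pvSeg; simp
  rw [h0] at h
  simp only [pvBest, Nat.cast_zero] at h
  rw [List.range_eq_range', h]
  rfl

-- B side
theorem pvScanl_getD (s : List Int) (c : Int) (m : ℕ) (hm : m ≤ s.length) :
    (List.scanl (· + ·) c s).getD m 0 = c + (s.take m).sum := by
  induction s generalizing c m with
  | nil =>
    have : m = 0 := by simpa using hm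
    subst this; simp
  | cons x xs ih =>
    cases m with
    | zero => simp
    | succ m =>
      rw [List.scanl_cons]
      have h := ih (c + x) m (by simpa using hm)
      simp only [List.getD_cons_succ, List.take_succ_cons, List.sum_cons, h]
      ring

theorem pvPrefix_getD (s : List Int) (m : ℕ) (hm : m ≤ s.length) :
    (pvPrefix s).getD m 0 = (s.take m).sum := by
  unfold pvPrefix
  rw [pvScanl_getD s 0 m hm]
  ring

theorem pvBest_le (s : List Int) (k : Int) (m : ℕ) : pvBest s k m ≤ m := by
  induction m with
  | zero => simp [pvBest]
  | succ m ih => simp only [pvBest]; omega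

theorem pvBest_ge (s : List Int) (k : Int) (j m : ℕ) (h : j < m) :
    j + 1 - pvMinI s k j ≤ pvBest s k m := by
  induction m with
  | zero => omega
  | succ m ih =>
    rcases Nat.lt_or_ge j m with hlt | hge
    · have := ih hlt
      simp only [pvBest]
      omega
    · have : j = m := by omega
      subst this
      simp only [pvBest]
      omega

theorem pvBest_attained (s : List Int) (k : Int) (m : ℕ) :
    pvBest s k m = 0 ∨ ∃ j, j < m ∧ pvBest s k m = j + 1 - pvMinI s k j := by
  induction m with
  | zero => left; rfl
  | succ m ih =>
    rcases le_total (m + 1 - pvMinI s k m) (pvBest s k m) with h | h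
    · rcases ih with h0 | ⟨j, hj, hje⟩
      · left; simp only [pvBest]; omega
      · right; exact ⟨j, by omega, by simp only [pvBest]; omega⟩
    · right; exact ⟨m, by omega, by simp only [pvBest]; omega⟩

theorem pvFeasible_iff (s : List Int) (k : Int) (hs : s.Pairwise (· ≤ ·)) (hk : 0 ≤ k)
    (L : ℕ) (hL : L ≤ s.length) :
    pvFeasible s (pvPrefix s) k L = true ↔ L ≤ pvBest s k s.length := by
  by_cases hL0 : L = 0
  · subst hL0; simp [pvFeasible]
  · have hL1 : 1 ≤ L := by omega
    unfold pvFeasible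
    rw [if_neg hL0, List.any_eq_true]
    constructor
    · rintro ⟨j, hjmem, hjp⟩
      rw [List.mem_range'_1] at hjmem
      obtain ⟨hj1, hj2⟩ := hjmem
      have hjn : j < s.length := by omega
      rw [decide_eq_true_iff] at hjp
      have hc : pvCost s (j+1-L) j ≤ k := by
        rw [pvPrefix_getD s (j+1) (by omega), pvPrefix_getD s (j+1-L) (by omega)] at hjp
        have e3 : ((j:Int) + 1 - ((j+1-L:ℕ):Int)) = (L:Int) := by omega
        unfold pvCost pvSeg
        rw [e3]
        linarith
      have hmin : pvMinI s k j ≤ j+1-L := pvMinI_le_of_cost s k j _ hc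
      have := pvBest_ge s k j s.length hjn
      omega
    · intro hLe
      rcases pvBest_attained s k s.length with h0 | ⟨j, hjn, hje⟩
      · omega
      · have hminle := pvMinI_le s k j
        have hd : L ≤ j + 1 - pvMinI s k j := hje ▸ hLe
        have hj1' : L ≤ j + 1 := le_trans hd (Nat.sub_le _ _)
        have hmem : j ∈ List.range' (L-1) (s.length - (L-1)) := by
          rw [List.mem_range'_1]
          omega
        refine ⟨j, hmem, ?_⟩
        · rw [decide_eq_true_iff]
          have hc : pvCost s (j+1-L) j ≤ k := by
            have h1 := pvMinI_cost s k j hk hjn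
            have h2 := pvCost_anti s hs (pvMinI s k j) (j+1-L) j (by omega) (by omega) hjn
            linarith
          rw [pvPrefix_getD s (j+1) (by omega), pvPrefix_getD s (j+1-L) (by omega)]
          have e3 : ((j:Int) + 1 - ((j+1-L:ℕ):Int)) = (L:Int) := by omega
          unfold pvCost pvSeg at hc
          rw [e3] at hc
          linarith

theorem pvBS_spec (s : List Int) (k : Int) (hs : s.Pairwise (· ≤ ·)) (hk : 0 ≤ k) :
    ∀ fuel lo hi, lo ≤ pvBest s k s.length → pvBest s k s.length ≤ hi → hi ≤ s.length →
      hi - lo < fuel → pvBS s (pvPrefix s) k fuel lo hi = pvBest s k s.length := by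
  intro fuel
  induction fuel with
  | zero => intro lo hi h1 h2 h3 h4; omega
  | succ f ih =>
    intro lo hi h1 h2 h3 h4
    by_cases hlh : lo < hi
    · simp only [pvBS]
      rw [if_pos hlh]
      have hmid1 : lo < (lo + hi + 1)/2 := by omega
      have hmid2 : (lo + hi + 1)/2 ≤ hi := by omega
      by_cases hf : (lo+hi+1)/2 ≤ pvBest s k s.length
      · have hfe : pvFeasible s (pvPrefix s) k ((lo+hi+1)/2) = true :=
          (pvFeasible_iff s k hs hk _ (le_trans hmid2 h3)).mpr hf
        rw [if_pos hfe]
        exact ih ((lo+hi+1)/2) hi hf h2 h3 (by omega)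
      · have hfe : ¬ pvFeasible s (pvPrefix s) k ((lo+hi+1)/2) = true := by
          rw [pvFeasible_iff s k hs hk _ (le_trans hmid2 h3)]
          omega
        rw [if_neg hfe]
        exact ih lo ((lo+hi+1)/2 - 1) h1 (by omega) (by omega) (by omega)
    · simp only [pvBS]
      rw [if_neg hlh]
      omega

-- ===== VERDICT (by name: the statement is the Claim_ definition above) =====
theorem max_freq_element_k_operations_spec : Claim_equal_max_freq_element_k_operations := by
  unfold Claim_equal_max_freq_element_k_operations
  intro nums k _ hpre
  unfold Spec_max_freq_element_k_operations
  rcases hpre with hnil | hk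
  · subst hnil; rfl
  · have hs : (PySem.List.sorted nums (fun x => x) false).Pairwise (· ≤ ·) := by
      have h := PySem.List.sorted_pairwise nums (fun x : Int => x)
      simpa using h
    unfold max_freq_element_k_operations max_freq_element_k_operations_alt
    dsimp only
    rw [pvA_eq_best _ k hs hk,
      pvBS_spec _ k hs hk _ 0 _ (Nat.zero_le _) (pvBest_le _ _ _) (le_refl _) (by omega)]
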